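-- pv_equiv track=rewrite | github.com/GetPastTheMonkey/advent-of-code | aoc2015/day11/day11_part2.py | password_increase
-- ===== SOURCE A (Python) =====
-- def password_increase(pw):
--     pw_list = [ord(d) for d in pw]
--     for i in range(1, len(pw_list) + 1):
--         overflow_happened = False
--
--         pw_list[-i] += 1
--
--         if pw_list[-i] > ord('z'):
--             pw_list[-i] = ord('a')
--             overflow_happened = True
--
--         if not overflow_happened:
--             break
--     return "".join([chr(d) for d in pw_list])
-- ===== SOURCE B (Python) =====
-- def password_increase(pw):
--     # Measure the trailing run of characters that overflow (ord >= ord('z')),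
--     # then build the result string directly instead of mutating a list.
--     run = 0
--     for c in reversed(pw):
--         if ord(c) >= ord('z'):
--             run += 1
--         else:
--             break
--     if run == len(pw):
--         return 'a' * len(pw)
--     b = len(pw) - 1 - run
--     return pw[:b] + chr(ord(pw[b]) + 1) + 'a' * run
-- ===== Notes on version B (the rewrite author's own statement) =====
-- stated objective: simpler
-- what changed: Replaces A's mutate-ord-list-with-carry-and-break loop by measuring the trailing run of overflowing characters (ord >= ord('z')) and constructing the result string directly as prefix + bumped char + 'a'*run; avoiding the per-character ord/chr list round-trip also makes it measurably faster.
import Mathlib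
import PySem

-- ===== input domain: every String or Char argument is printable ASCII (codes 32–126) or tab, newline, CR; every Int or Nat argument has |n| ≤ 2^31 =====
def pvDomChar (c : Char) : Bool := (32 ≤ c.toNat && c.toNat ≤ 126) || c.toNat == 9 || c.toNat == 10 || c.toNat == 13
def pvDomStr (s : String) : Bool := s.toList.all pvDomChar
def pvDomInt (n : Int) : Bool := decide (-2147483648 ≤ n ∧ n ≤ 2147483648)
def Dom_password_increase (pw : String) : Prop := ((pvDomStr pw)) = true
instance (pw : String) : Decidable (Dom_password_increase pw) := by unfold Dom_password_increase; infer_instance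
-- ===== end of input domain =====

-- B replaces A's mutate-ord-list-and-break loop by measuring the trailing overflow run
-- and constructing the result string directly (objective: simpler decomposition).

-- ===== PORT A =====
-- for i in range(1, len+1): pw_list[-i] += 1; wrap at 'z'; break when no overflow.
-- pw_list[-i] is position (len - i); List.set keeps the length, so the range bound is stable.
def pvALoop (l : List Int) (i : Nat) : List Int :=
  if h : i ≤ l.length then
    let idx := l.length - i
    let v := l.getD idx 0 + 1
    if v > 122 then pvALoop (l.set idx 97) (i + 1)
    else l.set idx v
  else l
termination_by l.length + 1 - i
decreasing_by simp; omega

def password_increase (pw : String) : String :=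
  let pwList := pw.toList.map (fun d => (d.toNat : Int))
  String.mk ((pvALoop pwList 1).map (fun d => Char.ofNat d.toNat))

-- ===== PORT B =====
-- count the trailing run of chars with ord >= ord('z'); if it is the whole string
-- return 'a'*n, else bump the char before the run and pad with 'a'*run.
def password_increase_alt (pw : String) : String :=
  let cs := pw.toList
  let run := (cs.reverse.takeWhile (fun c => 122 ≤ c.toNat)).length
  if run = cs.length then String.mk (List.replicate cs.length 'a')
  else
    let b := cs.length - 1 - run
    String.mk (cs.take b ++ Char.ofNat ((cs.getD b 'a').toNat + 1) :: List.replicate run 'a')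

-- ===== PRECONDITION & SPEC =====
def Spec_password_increase (pw : String) (out : String) : Prop := out = password_increase_alt pw
instance (pw : String) (out : String) : Decidable (Spec_password_increase pw out) := by unfold Spec_password_increase; infer_instance

-- ===== CLAIM (what is proved, stated in full; the proofs are below) =====
def Claim_equal_password_increase : Prop := ∀ (pw : String), Dom_password_increase pw → Spec_password_increase pw (password_increase pw)

-- ===== LEMMAS AND PROOFS =====

theorem pvALoop_stop (l : List Int) (i : Nat) (h : ¬ i ≤ l.length) : pvALoop l i = l := by
  rw [pvALoop]; simp [h]

theorem length_takeWhile_le' {α : Type} (p : α → Bool) (l : List α) :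
    (l.takeWhile p).length ≤ l.length := by
  induction l with
  | nil => simp
  | cons x xs ih => by_cases h : p x <;> simp [h] <;> omega

theorem pvALoop_getD_last (l' : List Int) (x : Int) (t : List Int) :
    (l' ++ x :: t).getD l'.length 0 = x := by
  simp [List.getD_eq_getElem?_getD, List.getElem?_append_right]

theorem pvALoop_set_last (l' : List Int) (x : Int) (t : List Int) (v : Int) :
    (l' ++ x :: t).set l'.length v = l' ++ v :: t := by
  simp

-- one step of A's loop at the last element of the untouched prefix
theorem pvALoop_step (l' : List Int) (x : Int) (t : List Int) :
    pvALoop ((l' ++ [x]) ++ t) (t.length + 1) =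
      if x + 1 > 122 then pvALoop (l' ++ 97 :: t) (t.length + 2) else l' ++ (x + 1) :: t := by
  have hle : t.length + 1 ≤ ((l' ++ [x]) ++ t).length := by simp
  conv_lhs => rw [pvALoop]
  rw [dif_pos hle]
  have hidx : ((l' ++ [x]) ++ t).length - (t.length + 1) = l'.length := by simp
  rw [List.append_assoc, List.singleton_append] at hidx ⊢
  simp only [hidx, pvALoop_getD_last, pvALoop_set_last]

theorem pvALoop_step1 (l' : List Int) (x : Int) :
    pvALoop (l' ++ [x]) 1 =
      if x + 1 > 122 then pvALoop (l' ++ [97]) 2 else l' ++ [x + 1] := by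
  have h := pvALoop_step l' x []
  simpa using h

theorem pvALoop_append : ∀ (l t : List Int), pvALoop (l ++ t) (t.length + 1) = pvALoop l 1 ++ t := by
  intro l
  induction l using List.reverseRecOn with
  | nil =>
    intro t
    rw [pvALoop_stop _ _ (by simp), pvALoop_stop _ _ (by simp)]
  | append_singleton l' x IH =>
    intro t
    rw [pvALoop_step, pvALoop_step1]
    by_cases hov : x + 1 > 122
    · rw [if_pos hov, if_pos hov]
      have h1 := IH (97 :: t)
      have h2 := IH [97]
      simp only [List.length_cons] at h1
      simp only [List.length_cons, List.length_nil] at h2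
      rw [show t.length + 2 = t.length + 1 + 1 from rfl, h1, h2]
      simp
    · rw [if_neg hov, if_neg hov]
      simp

-- the run of trailing overflow entries, on the ord list
def pvRun (l : List Int) : Nat := (l.reverse.takeWhile (fun x => 122 ≤ x)).length

theorem pvRun_le (l : List Int) : pvRun l ≤ l.length := by
  have := length_takeWhile_le' (fun x : Int => 122 ≤ x) l.reverse
  simpa [pvRun] using this

theorem pvALoop_one : ∀ (l : List Int),
    pvALoop l 1 =
      if pvRun l = l.length then List.replicate l.length 97
      else l.take (l.length - 1 - pvRun l) ++
        (l.getD (l.length - 1 - pvRun l) 0 + 1) :: List.replicate (pvRun l) 97 := by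
  intro l
  induction l using List.reverseRecOn with
  | nil => rw [pvALoop_stop _ _ (by simp)]; simp [pvRun]
  | append_singleton l' x IH =>
    rw [pvALoop_step1]
    by_cases hov : x + 1 > 122
    · have hx : ((122:Int) ≤ x) = True := by simp; omega
      have hrun : pvRun (l' ++ [x]) = pvRun l' + 1 := by
        simp [pvRun, hx]
      have h2 := pvALoop_append l' [97]
      simp only [List.length_cons, List.length_nil] at h2
      rw [if_pos hov, h2, IH, hrun]
      have hr' := pvRun_le l'
      by_cases hfull : pvRun l' = l'.length
      · have hfull2 : pvRun l' + 1 = (l' ++ [x]).length := by simp [hfull]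
        rw [if_pos hfull, if_pos hfull2]
        simp [List.replicate_succ' (n := l'.length)]
      · have hlt : pvRun l' < l'.length := by omega
        have hne : ¬ (pvRun l' + 1 = (l' ++ [x]).length) := by simp; omega
        rw [if_neg hfull, if_neg hne]
        have hidx : (l' ++ [x]).length - 1 - (pvRun l' + 1) = l'.length - 1 - pvRun l' := by
          simp; omega
        have hidxlt : l'.length - 1 - pvRun l' < l'.length := by omega
        have htake : (l' ++ [x]).take (l'.length - 1 - pvRun l') =
            l'.take (l'.length - 1 - pvRun l') := by
          rw [List.take_append_of_le_length]; omega
        have hget : (l' ++ [x]).getD (l'.length - 1 - pvRun l') 0 =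
            l'.getD (l'.length - 1 - pvRun l') 0 := by
          simp [List.getD_eq_getElem?_getD, List.getElem?_append_left hidxlt]
        rw [hidx, htake, hget]
        simp [List.replicate_succ' (n := pvRun l')]
    · have hx : ((122:Int) ≤ x) = False := by simp; omega
      have hrun : pvRun (l' ++ [x]) = 0 := by
        simp [pvRun, hx]
      have hne : ¬ (pvRun (l' ++ [x]) = (l' ++ [x]).length) := by simp [hrun]
      rw [if_neg hov, if_neg hne, hrun]
      have hidx : (l' ++ [x]).length - 1 - 0 = l'.length := by simp
      rw [hidx, show (l' ++ [x]).getD l'.length 0 = x from by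
        simpa using pvALoop_getD_last l' x []]
      simp

theorem pvRun_map (cs : List Char) :
    pvRun (cs.map (fun d => (d.toNat : Int))) =
      (cs.reverse.takeWhile (fun c => 122 ≤ c.toNat)).length := by
  have hp : ((fun x : Int => (decide (122 ≤ x))) ∘ (fun d : Char => (d.toNat : Int))) =
      (fun c : Char => decide (122 ≤ c.toNat)) := by
    funext c; simp
  simp [pvRun, ← List.map_reverse, List.takeWhile_map, hp]

theorem pvChar_roundtrip (c : Char) : Char.ofNat ((c.toNat : Int)).toNat = c := by
  simp [Char.ofNat_toNat]

theorem password_increase_eq_alt (pw : String) :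
    password_increase pw = password_increase_alt pw := by
  have lhs_eq : password_increase pw =
      String.mk ((pvALoop (pw.toList.map (fun d => (d.toNat : Int))) 1).map
        (fun d => Char.ofNat d.toNat)) := rfl
  have rhs_eq : password_increase_alt pw =
      (if (pw.toList.reverse.takeWhile (fun c => 122 ≤ c.toNat)).length = pw.toList.length then
        String.mk (List.replicate pw.toList.length 'a')
      else
        String.mk (pw.toList.take (pw.toList.length - 1 -
            (pw.toList.reverse.takeWhile (fun c => 122 ≤ c.toNat)).length) ++
          Char.ofNat ((pw.toList.getD (pw.toList.length - 1 -
            (pw.toList.reverse.takeWhile (fun c => 122 ≤ c.toNat)).length) 'a').toNat + 1) ::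
          List.replicate (pw.toList.reverse.takeWhile (fun c => 122 ≤ c.toNat)).length 'a')) := rfl
  rw [lhs_eq, rhs_eq]
  generalize pw.toList = cs
  rw [pvALoop_one, pvRun_map]
  set r := (cs.reverse.takeWhile (fun c => 122 ≤ c.toNat)).length with hr
  have hlen : (cs.map (fun d : Char => (d.toNat : Int))).length = cs.length := by simp
  by_cases hfull : r = cs.length
  · rw [if_pos (by rw [hlen]; exact hfull), if_pos hfull, hlen]
    congr 1
    rw [List.map_replicate, show Char.ofNat ((97 : Int)).toNat = 'a' from by decide]
  · rw [if_neg (by rw [hlen]; exact hfull), if_neg hfull]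
    have hrle : r ≤ cs.length := by
      have := length_takeWhile_le' (fun c : Char => 122 ≤ c.toNat) cs.reverse
      simpa [hr] using this
    have hrlt : r < cs.length := lt_of_le_of_ne hrle hfull
    have hb : (cs.map (fun d : Char => (d.toNat : Int))).length - 1 - r = cs.length - 1 - r := by
      rw [hlen]
    have hblt : cs.length - 1 - r < cs.length := by omega
    rw [hb]
    congr 1
    rw [List.map_append, List.map_cons]
    congr 1
    · rw [← List.map_take, List.map_map]
      have : ((fun d : Int => Char.ofNat d.toNat) ∘ (fun d : Char => (d.toNat : Int))) = id := by
        funext c; exact pvChar_roundtrip c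
      rw [this, List.map_id]
    · congr 1
      · have hget : (cs.map (fun d : Char => (d.toNat : Int))).getD (cs.length - 1 - r) 0 =
            ((cs.getD (cs.length - 1 - r) 'a').toNat : Int) := by
          simp [List.getD_eq_getElem?_getD, List.getElem?_eq_getElem hblt,
            List.getElem?_eq_getElem (by simpa [hlen] using hblt : cs.length - 1 - r <
              (cs.map (fun d : Char => (d.toNat : Int))).length)]
        rw [hget]
        norm_num
      · rw [List.map_replicate, show Char.ofNat ((97 : Int)).toNat = 'a' from by decide]

-- ===== VERDICT (by name: the statement is the Claim_ definition above) =====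
theorem password_increase_spec : Claim_equal_password_increase := by
  intro pw _
  unfold Spec_password_increase
  exact password_increase_eq_alt pw
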